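-- pv_equiv track=rewrite | github.com/alexspetty/nfield | experiments/row_sum_formula.py | N_exact
-- ===== SOURCE A (Python) =====
-- def N_exact(r, s, p):
--     """Exact count of bases b in {2,...,p-1} where floor(br/p) = floor(bs/p)."""
--     if r == s:
--         return p - 2  # all bases
--     count = 0
--     for b in range(2, p):
--         if b * r // p == b * s // p:
--             count += 1
--     return count
-- ===== SOURCE B (Python) =====
-- def N_exact(r, s, p):
--     """Exact count of bases b in {2,...,p-1} where floor(br/p) = floor(bs/p)."""
--     if r == s:
--         return p - 2
--     d = abs(r - s)
--     t = min(r, s)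
--     count = 0
--     b = 2
--     while b * d < p:           # for b*d >= p the two floors always differ
--         if b * t % p + b * d < p:
--             count += 1
--         b += 1
--     return count
-- ===== Notes on version B (the rewrite author's own statement) =====
-- stated objective: faster
-- what changed: Instead of scanning all bases 2..p-1 and comparing two floor divisions, B notes floor(br/p)=floor(bs/p) is impossible once b*|r-s| >= p, so it only scans b < p/|r-s| and tests the single modular inequality (b*min(r,s)) % p + b*|r-s| < p.
import Mathlib
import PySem

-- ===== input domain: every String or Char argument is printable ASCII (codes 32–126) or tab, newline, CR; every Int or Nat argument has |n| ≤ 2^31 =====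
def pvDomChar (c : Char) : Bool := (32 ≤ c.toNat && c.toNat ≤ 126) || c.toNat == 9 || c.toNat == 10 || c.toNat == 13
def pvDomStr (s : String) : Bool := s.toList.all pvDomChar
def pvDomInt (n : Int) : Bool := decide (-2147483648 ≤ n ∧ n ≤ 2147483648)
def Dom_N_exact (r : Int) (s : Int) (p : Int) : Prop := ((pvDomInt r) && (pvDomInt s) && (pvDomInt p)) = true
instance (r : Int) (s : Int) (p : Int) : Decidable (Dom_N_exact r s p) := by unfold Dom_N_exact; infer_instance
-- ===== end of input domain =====

-- B stops the scan at b*|r-s| >= p (beyond which the floors always differ) and tests a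
-- single modular inequality instead of two floor divisions; asymptotically fewer iterations.


-- ===== PORT A =====
def N_exact (r : Int) (s : Int) (p : Int) : Int :=
  if r = s then p - 2
  else (PySem.List.pyRange 2 p 1).foldl
    (fun count b =>
      if PySem.Int.floordiv (b * r) p = PySem.Int.floordiv (b * s) p then count + 1 else count) 0

-- ===== PORT B =====
-- the while loop of Source B; fuel only makes the recursion total, (p-2).toNat always suffices
def NexactLoopB (fuel : Nat) (t : Int) (d : Int) (p : Int) (b : Int) (count : Int) : Int :=
  match fuel with
  | 0 => count
  | Nat.succ fuel =>
    if b * d < p then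
      NexactLoopB fuel t d p (b + 1)
        (if PySem.Int.mod (b * t) p + b * d < p then count + 1 else count)
    else count

def N_exact_alt (r : Int) (s : Int) (p : Int) : Int :=
  if r = s then p - 2
  else NexactLoopB (p - 2).toNat (min r s) |r - s| p 2 0

-- ===== PRECONDITION & SPEC =====
def Spec_N_exact (r : Int) (s : Int) (p : Int) (out : Int) : Prop := out = N_exact_alt r s p
instance (r : Int) (s : Int) (p : Int) (out : Int) : Decidable (Spec_N_exact r s p out) := by unfold Spec_N_exact; infer_instance

-- ===== CLAIM (what is proved, stated in full; the proofs are below) =====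
def Claim_equal_N_exact : Prop := ∀ (r : Int) (s : Int) (p : Int), Dom_N_exact r s p → Spec_N_exact r s p (N_exact r s p)

-- ===== LEMMAS AND PROOFS =====

-- key arithmetic fact: for p > 0 and 0 ≤ e, floor((x+e)/p) = floor(x/p) iff x%p + e < p
theorem nexact_key (p x e : Int) (hp : 0 < p) (he : 0 ≤ e) :
    (PySem.Int.floordiv x p = PySem.Int.floordiv (x + e) p) ↔ PySem.Int.mod x p + e < p := by
  rw [PySem.Int.floordiv_eq_ediv_of_pos hp, PySem.Int.floordiv_eq_ediv_of_pos hp,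
    PySem.Int.mod_eq_emod_of_pos hp]
  have hxe : x / p * p + x % p = x := Int.ediv_mul_add_emod x p
  have hm0 : 0 ≤ x % p := Int.emod_nonneg x (by omega)
  have hmp : x % p < p := Int.emod_lt_of_pos x hp
  have hsplit : (x + e) / p = x / p + (x % p + e) / p := by
    have : x + e = (x % p + e) + (x / p) * p := by omega
    rw [this, Int.add_mul_ediv_right _ _ (by omega : p ≠ 0)]
    omega
  constructor
  · intro h
    by_contra hlt
    have h1 : 1 ≤ (x % p + e) / p := by
      rw [Int.le_ediv_iff_mul_le hp]; omega
    omega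
  · intro h
    have : (x % p + e) / p = 0 := Int.ediv_eq_zero_of_lt (by omega) (by omega)
    omega

-- the A-side test, phrased at min/max: floor(b·r/p)=floor(b·s/p) ↔ floor(b·t/p)=floor(b·t/p + b·d/p)
theorem nexact_cond (r s p b : Int) (hp : 0 < p) (hb : 0 ≤ b) :
    (PySem.Int.floordiv (b * r) p = PySem.Int.floordiv (b * s) p) ↔
      PySem.Int.mod (b * min r s) p + b * |r - s| < p := by
  rcases le_total r s with h | h
  · have h1 : min r s = r := min_eq_left h
    have h2 : b * r + b * |r - s| = b * s := by
      rw [abs_of_nonpos (by omega : r - s ≤ 0)]; ring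
    rw [h1, ← h2]
    exact nexact_key p (b * r) (b * |r - s|) hp (mul_nonneg hb (abs_nonneg _))
  · have h1 : min r s = s := min_eq_right h
    have h2 : b * s + b * |r - s| = b * r := by
      rw [abs_of_nonneg (by omega : 0 ≤ r - s)]; ring
    rw [h1, ← h2, eq_comm]
    exact nexact_key p (b * s) (b * |r - s|) hp (mul_nonneg hb (abs_nonneg _))

-- the B loop computes the count of matching bases in [b, p)
theorem nexact_loop_eq (r s p : Int) (hrs : r ≠ s) (n : Nat) : ∀ b count : Int, 2 ≤ b → (p - b).toNat ≤ n →
    NexactLoopB n (min r s) |r - s| p b count =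
      count + ((PySem.List.pyRange b p 1).countP
        (fun x => decide (PySem.Int.floordiv (x * r) p = PySem.Int.floordiv (x * s) p)) : Int) := by
  induction n with
  | zero =>
    intro b count hb hn
    have hpb : p ≤ b := by omega
    rw [PySem.List.pyRange_one_eq_nil hpb]
    simp [NexactLoopB]
  | succ n ih =>
    intro b count hb hn
    by_cases hlt : p ≤ b
    · rw [PySem.List.pyRange_one_eq_nil hlt]
      have h1 : 1 ≤ |r - s| := abs_pos.mpr (sub_ne_zero.mpr hrs)
      have h2 : b ≤ b * |r - s| := le_mul_of_one_le_right (by omega) h1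
      have hd : ¬ b * |r - s| < p := by omega
      simp [NexactLoopB, hd]
    · rw [not_le] at hlt
      have hp : 0 < p := by omega
      rw [PySem.List.pyRange_one_cons hlt, List.countP_cons]
      by_cases hg : b * |r - s| < p
      · rw [NexactLoopB, if_pos hg, ih (b + 1) _ (by omega) (by omega)]
        by_cases hc : PySem.Int.floordiv (b * r) p = PySem.Int.floordiv (b * s) p
        · rw [if_pos ((nexact_cond r s p b hp (by omega)).mp hc), if_pos (decide_eq_true hc)]
          push_cast
          ring
        · have hm : ¬ (PySem.Int.mod (b * min r s) p + b * |r - s| < p) := fun h =>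
            hc ((nexact_cond r s p b hp (by omega)).mpr h)
          rw [if_neg hm, if_neg (by simpa using hc)]
          push_cast
          ring
      · -- once b*|r-s| ≥ p, no base x ≥ b can match: the count over [b, p) is 0
        rw [NexactLoopB, if_neg hg]
        have hall : ∀ x ∈ PySem.List.pyRange b p 1,
            ¬ (PySem.Int.floordiv (x * r) p = PySem.Int.floordiv (x * s) p) := by
          intro x hx
          rw [PySem.List.mem_pyRange_one] at hx
          intro hc
          have := (nexact_cond r s p x hp (by omega)).mp hc
          have hmod : 0 ≤ PySem.Int.mod (x * min r s) p := by
            rw [PySem.Int.mod_eq_emod_of_pos hp]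
            exact Int.emod_nonneg _ (by omega)
          have hxd : b * |r - s| ≤ x * |r - s| :=
            mul_le_mul_of_nonneg_right hx.1 (abs_nonneg _)
          omega
        have hPb : ¬ (PySem.Int.floordiv (b * r) p = PySem.Int.floordiv (b * s) p) :=
          hall b (by rw [PySem.List.mem_pyRange_one]; omega)
        have hrest : (PySem.List.pyRange (b + 1) p 1).countP
            (fun x => decide (PySem.Int.floordiv (x * r) p = PySem.Int.floordiv (x * s) p)) = 0 := by
          rw [List.countP_eq_zero]
          intro x hx
          rw [PySem.List.mem_pyRange_one] at hx
          simpa using hall x (by rw [PySem.List.mem_pyRange_one]; omega)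
        rw [hrest, if_neg (by simpa using hPb)]
        simp

-- ===== VERDICT (by name: the statement is the Claim_ definition above) =====
theorem N_exact_spec : Claim_equal_N_exact := by
  intro r s p _
  unfold Spec_N_exact N_exact N_exact_alt
  by_cases hrs : r = s
  · simp [hrs]
  · rw [if_neg hrs, if_neg hrs,
      PySem.List.foldl_ite_add_one
        (p := fun b => PySem.Int.floordiv (b * r) p = PySem.Int.floordiv (b * s) p),
      nexact_loop_eq r s p hrs (p - 2).toNat 2 0 (by omega) (by omega)]
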